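-- pv_equiv track=rewrite | github.com/Ameen-Ahmed28/MULTI-LINGUAL-FINANCIAL-CHATBOT | app.py | is_strictly_finance_related
-- ===== SOURCE A (Python) =====
-- def is_strictly_finance_related(query: str) -> bool:
--     """ENHANCED check if query is finance-related with comprehensive keywords"""
--
--     # COMPREHENSIVE finance keywords including advanced concepts
--     finance_keywords = [
--         # Core Finance
--         'stock', 'stocks', 'share', 'shares', 'equity', 'equities', 'bond', 'bonds',
--         'investment', 'investments', 'invest', 'investing', 'investor', 'finance',
--         'financial', 'money', 'cash', 'currency', 'dollar', 'rupee', 'price', 'cost',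
--
--         # Banking & Credit
--         'bank', 'banking', 'account', 'savings', 'checking', 'loan', 'loans',
--         'credit', 'debit', 'mortgage', 'emi', 'interest', 'rate', 'rates', 'apr',
--
--         # Trading & Markets
--         'trading', 'trade', 'trader', 'market', 'markets', 'exchange', 'nse', 'bse',
--         'nasdaq', 'dow', 's&p', 'portfolio', 'asset', 'assets', 'security', 'securities',
--
--         # Investment Products
--         'mutual fund', 'mutual funds', 'etf', 'etfs', 'sip', 'fd', 'fixed deposit',
--         'recurring deposit', 'dividend', 'dividends', 'capital gains', 'roi', 'returns', 'yield',
--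
--         # Advanced Finance & Derivatives
--         'futures', 'options', 'derivatives', 'commodity', 'commodities', 'forex',
--         'currency', 'crypto', 'cryptocurrency', 'bitcoin', 'blockchain', 'derivatives',
--         'black scholes', 'black-scholes', 'options pricing', 'put option', 'call option',
--         'strike price', 'expiry', 'volatility', 'delta', 'gamma', 'theta', 'vega', 'rho',
--
--         # Financial Planning & Analysis
--         'budget', 'budgeting', 'planning', 'retirement', 'pension', 'insurance',
--         'tax', 'taxation', 'deduction', 'exemption', 'wealth', 'income', 'expense',
--         'cash flow', 'dcf', 'npv', 'irr', 'wacc', 'capm',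
--
--         # Economic Terms
--         'inflation', 'deflation', 'gdp', 'economy', 'economic', 'recession', 'growth',
--         'bull market', 'bear market', 'volatility', 'risk', 'diversification',
--         'correlation', 'beta', 'alpha', 'sharpe ratio',
--
--         # Business Finance
--         'revenue', 'profit', 'loss', 'earnings', 'valuation', 'ipo', 'lic', 'pe ratio',
--         'balance sheet', 'cash flow', 'debt', 'liability', 'capital', 'working capital',
--         'financial statements', 'income statement', 'ebitda', 'eps', 'book value',
--
--         # Quantitative Finance & Statistics
--         'formula', 'calculation', 'model', 'financial model', 'pricing model',
--         'risk model', 'monte carlo', 'binomial', 'trinomial', 'stochastic',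
--         'mean reversion', 'arbitrage', 'hedge', 'hedging', 'statistics', 'statistical',
--         'regression', 'correlation', 'variance', 'standard deviation', 'median', 'mean',
--         'prediction', 'forecasting', 'analysis', 'data analysis', 'market prediction'
--     ]
--
--     # Financial phrases and patterns
--     finance_phrases = [
--         'how much', 'what is the price', 'cost of', 'value of', 'worth of',
--         'should i invest', 'how to invest', 'best investment', 'financial advice',
--         'money management', 'portfolio management', 'risk management',
--         'financial planning', 'investment strategy', 'market analysis',
--         'stock analysis', 'company valuation', 'financial ratio', 'predicting market',
--         'market performance', 'statistical analysis', 'market statistics'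
--     ]
--
--     query_lower = query.lower().strip()
--
--     # Remove special characters for better matching
--     query_clean = query_lower.replace('-', ' ').replace('_', ' ')
--
--     # Check for finance keywords (including multi-word terms)
--     has_finance_keyword = any(keyword.lower() in query_clean for keyword in finance_keywords)
--
--     # Check for finance phrases
--     has_finance_phrase = any(phrase.lower() in query_clean for phrase in finance_phrases)
--
--     # Special checks for specific financial concepts
--     special_finance_terms = [
--         'black scholes', 'black-scholes', 'bs model', 'options pricing',
--         'put call parity', 'binomial model', 'monte carlo simulation',
--         'value at risk', 'var', 'credit risk', 'market risk',
--         'financial engineering', 'quantitative finance', 'derivatives pricing',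
--         'statistics used in predicting market', 'statistical analysis market'
--     ]
--
--     has_special_term = any(term.lower() in query_clean for term in special_finance_terms)
--
--     return has_finance_keyword or has_finance_phrase or has_special_term
-- ===== SOURCE B (Python) =====
-- # B: one flat pre-lowercased term table ('|'-packed rows, split once at load), bucketed by
-- # two-char prefix into a dict; a single walk over the query's start positions prefix-tests
-- # only the few terms whose bucket matches there, replacing A's per-keyword substring scans.
-- _TERM_ROWS = [
--     'stock|stocks|share|shares|equity|equities|bond|bonds',
--     'investment|investments|invest|investing|investor|finance',
--     'financial|money|cash|currency|dollar|rupee|price|cost|bank',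
--     'banking|account|savings|checking|loan|loans|credit|debit',
--     'mortgage|emi|interest|rate|rates|apr|trading|trade|trader',
--     'market|markets|exchange|nse|bse|nasdaq|dow|s&p|portfolio',
--     'asset|assets|security|securities|mutual fund|mutual funds',
--     'etf|etfs|sip|fd|fixed deposit|recurring deposit|dividend',
--     'dividends|capital gains|roi|returns|yield|futures|options',
--     'derivatives|commodity|commodities|forex|currency|crypto',
--     'cryptocurrency|bitcoin|blockchain|derivatives|black scholes',
--     'black-scholes|options pricing|put option|call option',
--     'strike price|expiry|volatility|delta|gamma|theta|vega|rho',
--     'budget|budgeting|planning|retirement|pension|insurance|tax',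
--     'taxation|deduction|exemption|wealth|income|expense|cash flow',
--     'dcf|npv|irr|wacc|capm|inflation|deflation|gdp|economy',
--     'economic|recession|growth|bull market|bear market|volatility',
--     'risk|diversification|correlation|beta|alpha|sharpe ratio',
--     'revenue|profit|loss|earnings|valuation|ipo|lic|pe ratio',
--     'balance sheet|cash flow|debt|liability|capital',
--     'working capital|financial statements|income statement|ebitda',
--     'eps|book value|formula|calculation|model|financial model',
--     'pricing model|risk model|monte carlo|binomial|trinomial',
--     'stochastic|mean reversion|arbitrage|hedge|hedging|statistics',
--     'statistical|regression|correlation|variance',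
--     'standard deviation|median|mean|prediction|forecasting',
--     'analysis|data analysis|market prediction|how much',
--     'what is the price|cost of|value of|worth of|should i invest',
--     'how to invest|best investment|financial advice',
--     'money management|portfolio management|risk management',
--     'financial planning|investment strategy|market analysis',
--     'stock analysis|company valuation|financial ratio',
--     'predicting market|market performance|statistical analysis',
--     'market statistics|black scholes|black-scholes|bs model',
--     'options pricing|put call parity|binomial model',
--     'monte carlo simulation|value at risk|var|credit risk',
--     'market risk|financial engineering|quantitative finance',
--     'derivatives pricing|statistics used in predicting market',
--     'statistical analysis market',
-- ]
-- _TERMS = [t for row in _TERM_ROWS for t in row.split('|')]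
--
--
-- _BY_PREFIX = {}
-- for _t in _TERMS:
--     _BY_PREFIX.setdefault(_t[:2], []).append(_t)
--
--
-- def is_strictly_finance_related(query: str) -> bool:
--     q = query.lower().strip().replace('-', ' ').replace('_', ' ')
--     return any(q.startswith(t, i)
--                for i in range(len(q))
--                for t in _BY_PREFIX.get(q[i:i + 2], ()))
-- ===== Notes on version B (the rewrite author's own statement) =====
-- stated objective: alternative
-- what changed: Instead of three any-loops each doing a full substring scan of the query per keyword, B splits one flat pre-lowercased delimiter-packed term table at module load, buckets the terms in a dict keyed by their two-char prefix, and makes a single walk over the query's start positions, prefix-testing only the terms whose bucket matches the two characters found there.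
import Mathlib
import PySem

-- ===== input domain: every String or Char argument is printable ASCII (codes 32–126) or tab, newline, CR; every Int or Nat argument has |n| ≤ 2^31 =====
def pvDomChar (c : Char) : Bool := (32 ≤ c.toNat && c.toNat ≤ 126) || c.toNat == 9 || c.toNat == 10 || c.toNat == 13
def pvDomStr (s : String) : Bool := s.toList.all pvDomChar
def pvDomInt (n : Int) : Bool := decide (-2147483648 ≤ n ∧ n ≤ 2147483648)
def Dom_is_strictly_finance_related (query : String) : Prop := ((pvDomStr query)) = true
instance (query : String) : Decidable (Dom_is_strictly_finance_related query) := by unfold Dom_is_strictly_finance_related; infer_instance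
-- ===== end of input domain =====

-- B replaces A's three per-keyword substring scans by one walk over the query's start positions,
-- testing only the terms bucketed (by two-char prefix) under the characters found there (objective: alternative).

-- ===== PORT A =====
def financeKeywords : List String := [
  "stock", "stocks", "share", "shares", "equity", "equities", "bond", "bonds", "investment",
  "investments", "invest", "investing", "investor", "finance", "financial", "money", "cash",
  "currency", "dollar", "rupee", "price", "cost", "bank", "banking", "account", "savings",
  "checking", "loan", "loans", "credit", "debit", "mortgage", "emi", "interest", "rate", "rates",
  "apr", "trading", "trade", "trader", "market", "markets", "exchange", "nse", "bse", "nasdaq",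
  "dow", "s&p", "portfolio", "asset", "assets", "security", "securities", "mutual fund",
  "mutual funds", "etf", "etfs", "sip", "fd", "fixed deposit", "recurring deposit", "dividend",
  "dividends", "capital gains", "roi", "returns", "yield", "futures", "options", "derivatives",
  "commodity", "commodities", "forex", "currency", "crypto", "cryptocurrency", "bitcoin",
  "blockchain", "derivatives", "black scholes", "black-scholes", "options pricing", "put option",
  "call option", "strike price", "expiry", "volatility", "delta", "gamma", "theta", "vega", "rho",
  "budget", "budgeting", "planning", "retirement", "pension", "insurance", "tax", "taxation",
  "deduction", "exemption", "wealth", "income", "expense", "cash flow", "dcf", "npv", "irr",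
  "wacc", "capm", "inflation", "deflation", "gdp", "economy", "economic", "recession", "growth",
  "bull market", "bear market", "volatility", "risk", "diversification", "correlation", "beta",
  "alpha", "sharpe ratio", "revenue", "profit", "loss", "earnings", "valuation", "ipo", "lic",
  "pe ratio", "balance sheet", "cash flow", "debt", "liability", "capital", "working capital",
  "financial statements", "income statement", "ebitda", "eps", "book value", "formula",
  "calculation", "model", "financial model", "pricing model", "risk model", "monte carlo",
  "binomial", "trinomial", "stochastic", "mean reversion", "arbitrage", "hedge", "hedging",
  "statistics", "statistical", "regression", "correlation", "variance", "standard deviation",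
  "median", "mean", "prediction", "forecasting", "analysis", "data analysis", "market prediction"]

def financePhrases : List String := [
  "how much", "what is the price", "cost of", "value of", "worth of", "should i invest",
  "how to invest", "best investment", "financial advice", "money management",
  "portfolio management", "risk management", "financial planning", "investment strategy",
  "market analysis", "stock analysis", "company valuation", "financial ratio",
  "predicting market", "market performance", "statistical analysis", "market statistics"]

def specialFinanceTerms : List String := [
  "black scholes", "black-scholes", "bs model", "options pricing", "put call parity",
  "binomial model", "monte carlo simulation", "value at risk", "var", "credit risk",
  "market risk", "financial engineering", "quantitative finance", "derivatives pricing",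
  "statistics used in predicting market", "statistical analysis market"]

def is_strictly_finance_related (query : String) : Bool :=
  let queryLower := PySem.Str.strip (PySem.Str.lower query)
  let queryClean := PySem.Str.replace (PySem.Str.replace queryLower "-" " ") "_" " "
  let hasFinanceKeyword := financeKeywords.any (fun keyword => PySem.Str.isIn (PySem.Str.lower keyword) queryClean)
  let hasFinancePhrase := financePhrases.any (fun phrase => PySem.Str.isIn (PySem.Str.lower phrase) queryClean)
  let hasSpecialTerm := specialFinanceTerms.any (fun term => PySem.Str.isIn (PySem.Str.lower term) queryClean)
  hasFinanceKeyword || hasFinancePhrase || hasSpecialTerm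

-- ===== PORT B =====
def termRows : List String := [
  "stock|stocks|share|shares|equity|equities|bond|bonds",
  "investment|investments|invest|investing|investor|finance",
  "financial|money|cash|currency|dollar|rupee|price|cost|bank",
  "banking|account|savings|checking|loan|loans|credit|debit",
  "mortgage|emi|interest|rate|rates|apr|trading|trade|trader",
  "market|markets|exchange|nse|bse|nasdaq|dow|s&p|portfolio",
  "asset|assets|security|securities|mutual fund|mutual funds",
  "etf|etfs|sip|fd|fixed deposit|recurring deposit|dividend",
  "dividends|capital gains|roi|returns|yield|futures|options",
  "derivatives|commodity|commodities|forex|currency|crypto",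
  "cryptocurrency|bitcoin|blockchain|derivatives|black scholes",
  "black-scholes|options pricing|put option|call option",
  "strike price|expiry|volatility|delta|gamma|theta|vega|rho",
  "budget|budgeting|planning|retirement|pension|insurance|tax",
  "taxation|deduction|exemption|wealth|income|expense|cash flow",
  "dcf|npv|irr|wacc|capm|inflation|deflation|gdp|economy",
  "economic|recession|growth|bull market|bear market|volatility",
  "risk|diversification|correlation|beta|alpha|sharpe ratio",
  "revenue|profit|loss|earnings|valuation|ipo|lic|pe ratio",
  "balance sheet|cash flow|debt|liability|capital",
  "working capital|financial statements|income statement|ebitda",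
  "eps|book value|formula|calculation|model|financial model",
  "pricing model|risk model|monte carlo|binomial|trinomial",
  "stochastic|mean reversion|arbitrage|hedge|hedging|statistics",
  "statistical|regression|correlation|variance",
  "standard deviation|median|mean|prediction|forecasting",
  "analysis|data analysis|market prediction|how much",
  "what is the price|cost of|value of|worth of|should i invest",
  "how to invest|best investment|financial advice",
  "money management|portfolio management|risk management",
  "financial planning|investment strategy|market analysis",
  "stock analysis|company valuation|financial ratio",
  "predicting market|market performance|statistical analysis",
  "market statistics|black scholes|black-scholes|bs model",
  "options pricing|put call parity|binomial model",
  "monte carlo simulation|value at risk|var|credit risk",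
  "market risk|financial engineering|quantitative finance",
  "derivatives pricing|statistics used in predicting market",
  "statistical analysis market"]

-- _TERMS = [t for row in _TERM_ROWS for t in row.split('|')]; '|' is a nonempty separator,
-- so row.split('|') = (PySem.Str.split? row "|").getD []
def bTerms : List String := termRows.flatMap (fun row => (PySem.Str.split? row "|").getD [])

-- _BY_PREFIX: terms bucketed by their two-char prefix t[:2];
-- d.setdefault(p, []).append(t) is PySem.Dict.modify p [] (· ++ [t])
def byPrefix : PySem.Dict String (List String) :=
  bTerms.foldl (fun d t => d.modify (PySem.Str.slice t none (some 2)) [] (· ++ [t])) PySem.Dict.empty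

-- the any-generator over i in range(len(q)); q[i:i+2] is PySem.Str.slice q i (i+2);
-- q.startswith(t, i) with 0 ≤ i is: t.toList is a prefix of q.toList.drop i.toNat
def is_strictly_finance_related_alt (query : String) : Bool :=
  let q := PySem.Str.replace (PySem.Str.replace (PySem.Str.strip (PySem.Str.lower query)) "-" " ") "_" " "
  (PySem.List.pyRange 0 (PySem.Str.len q) 1).any (fun i =>
    (PySem.Dict.getD byPrefix (PySem.Str.slice q (some i) (some (i + 2))) []).any
      (fun t => PySem.Chars.startswith (q.toList.drop i.toNat) t.toList))

-- ===== PRECONDITION & SPEC =====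
def Spec_is_strictly_finance_related (query : String) (out : Bool) : Prop := out = is_strictly_finance_related_alt query
instance (query : String) (out : Bool) : Decidable (Spec_is_strictly_finance_related query out) := by unfold Spec_is_strictly_finance_related; infer_instance

-- ===== CLAIM =====
def Claim_equal_is_strictly_finance_related : Prop := ∀ (query : String), Dom_is_strictly_finance_related query → Spec_is_strictly_finance_related query (is_strictly_finance_related query)

-- ===== LEMMAS AND PROOFS =====

-- the rows split into exactly A's three keyword lists (already lowercase), concatenated
set_option maxRecDepth 100000 in
set_option maxHeartbeats 1000000 in
theorem bTerms_eq :
    bTerms = (financeKeywords ++ financePhrases ++ specialFinanceTerms).map PySem.Str.lower := by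
  decide

-- every term has at least two characters
set_option maxRecDepth 100000 in
theorem bTerms_len2 : ∀ t ∈ bTerms, 2 ≤ t.toList.length := by rw [bTerms_eq]; decide

-- bucket membership: t is in the bucket of key k iff t is a term whose two-char prefix is k
theorem mem_bucket_iff (k : String) (t : String) :
    t ∈ PySem.Dict.getD byPrefix k [] ↔ t ∈ bTerms ∧ PySem.Str.slice t none (some 2) = k := by
  have h : byPrefix = (bTerms.map (fun t => (PySem.Str.slice t none (some 2), t))).foldl
      (fun d p => d.modify p.1 [] (· ++ [p.2])) PySem.Dict.empty := by
    rw [List.foldl_map]; rfl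
  rw [h, PySem.Dict.getD_foldl_modify_append]
  simp only [PySem.Dict.getD_empty, List.nil_append, List.mem_map, List.mem_filter,
    List.mem_map]
  constructor
  · rintro ⟨⟨k', t'⟩, ⟨⟨u, hu, huv⟩, hc⟩, rfl⟩
    cases huv
    exact ⟨hu, by simpa using hc⟩
  · rintro ⟨ht, rfl⟩
    exact ⟨(PySem.Str.slice t none (some 2), t), ⟨⟨t, ht, rfl⟩, by simp⟩, rfl⟩

-- the bucketed positional walk finds some term iff some term occurs as a substring
theorem bucket_scan_eq_any_isIn (q : String) :
    ((PySem.List.pyRange 0 (q.toList.length : Int) 1).any fun i =>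
      (PySem.Dict.getD byPrefix (PySem.Str.slice q (some i) (some (i + 2))) []).any
        fun t => PySem.Chars.startswith (q.toList.drop i.toNat) t.toList)
      = bTerms.any fun t => PySem.Chars.isIn t.toList q.toList := by
  apply Bool.eq_iff_iff.mpr
  simp only [List.any_eq_true, PySem.List.mem_pyRange_one]
  constructor
  · rintro ⟨i, ⟨h0, hlt⟩, t, htb, hsw⟩
    obtain ⟨ht, -⟩ := (mem_bucket_iff _ t).mp htb
    exact ⟨t, ht, (PySem.Chars.exists_prefix_drop_iff_isIn t.toList q.toList).mp
      ⟨i.toNat, (PySem.Chars.startswith_iff _ _).mp hsw⟩⟩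
  · rintro ⟨t, ht, hin⟩
    obtain ⟨j, hpre⟩ := (PySem.Chars.exists_prefix_drop_iff_isIn t.toList q.toList).mpr hin
    have hlen2 : 2 ≤ t.toList.length := bTerms_len2 t ht
    obtain ⟨suf, hsuf⟩ := hpre
    have hdl : (q.toList.drop j).length = t.toList.length + suf.length := by
      rw [← hsuf, List.length_append]
    have hj : j < q.toList.length := by
      rw [List.length_drop] at hdl; omega
    refine ⟨(j : Int), ⟨by positivity, by exact_mod_cast hj⟩, t, ?_, ?_⟩
    · refine (mem_bucket_iff _ t).mpr ⟨ht, String.toList_inj.mp ?_⟩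
      rw [PySem.Str.toList_slice, PySem.Str.toList_slice]
      simp only [PySem.Chars.slice_eq_listSlice]
      have h2 : ((j : Int) + 2) = ((j + 2 : Nat) : Int) := by push_cast; ring
      have h3 : (2 : Int) = ((2 : Nat) : Int) := by norm_num
      rw [h2, h3, PySem.List.slice_to_natCast, PySem.List.slice_natCast]
      have : j + 2 - j = 2 := by omega
      rw [this, ← hsuf, List.take_append_of_le_length hlen2]
    · rw [PySem.Chars.startswith_iff, Int.toNat_natCast, ← hsuf]
      exact ⟨suf, rfl⟩

-- ===== VERDICT =====
theorem is_strictly_finance_related_spec : Claim_equal_is_strictly_finance_related := by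
  intro query _
  unfold Spec_is_strictly_finance_related is_strictly_finance_related is_strictly_finance_related_alt
  simp only [PySem.Str.len_eq, bucket_scan_eq_any_isIn, bTerms_eq, PySem.Str.isIn]
  simp [List.any_append, Function.comp_def, PySem.Str.toList_lower, Bool.or_assoc]
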